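-- pv_equiv track=rewrite | github.com/captanlevi/UNSW | flowprintOptimal/sekigo/dataAnalysis/dataFrameProcessor.py | __getStripIndices
-- ===== SOURCE A (Python) =====
-- def __getStripIndices(arr):
--     start_index = 0
--     end_index = len(arr) -1
--
--     while start_index < len(arr) and arr[start_index] == 0:
--         start_index += 1
--     while end_index >= start_index and arr[end_index] == 0:
--         end_index -= 1
--
--     return start_index,end_index
-- ===== SOURCE B (Python) =====
-- def __getStripIndices(arr):
--     nz = [i for i in range(len(arr)) if arr[i] != 0]
--     if nz:
--         return nz[0], nz[-1]
--     return len(arr), len(arr) - 1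
-- ===== Notes on version B (the rewrite author's own statement) =====
-- stated objective: simpler
-- what changed: Replaces the two oppositely-directed early-exit while-loop pointer scans by a single forward comprehension collecting all non-zero indices and taking its first and last element, with the (len, len-1) fallback for all-zero/empty input.
import Mathlib
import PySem

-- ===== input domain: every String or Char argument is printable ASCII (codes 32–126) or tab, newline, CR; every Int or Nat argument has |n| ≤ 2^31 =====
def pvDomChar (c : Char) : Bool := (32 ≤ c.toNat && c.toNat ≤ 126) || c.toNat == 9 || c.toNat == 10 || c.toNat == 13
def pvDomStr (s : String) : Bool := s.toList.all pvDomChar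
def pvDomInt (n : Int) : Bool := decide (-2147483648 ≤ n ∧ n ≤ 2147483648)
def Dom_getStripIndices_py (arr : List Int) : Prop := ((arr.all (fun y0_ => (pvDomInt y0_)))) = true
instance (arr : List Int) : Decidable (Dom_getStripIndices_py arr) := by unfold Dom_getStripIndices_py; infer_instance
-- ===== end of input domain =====

-- B replaces A's two oppositely-directed early-exit pointer scans by one forward pass
-- collecting the non-zero indices and taking that list's endpoints (objective: simpler).

-- ===== PORT A =====
-- first while loop: advance start_index while in range and arr[start_index] == 0
def pvAStart (arr : List Int) (i : Nat) : Nat :=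
  if h : i < arr.length then
    if arr[i] = 0 then pvAStart arr (i + 1) else i
  else i
termination_by arr.length - i

-- second while loop: decrement end_index while end_index >= start_index and arr[end_index] == 0
-- (the index access is always in range when the condition's first conjunct holds; getD 0 is exact there)
def pvAEnd (arr : List Int) (s e : Int) : Int :=
  if _h : s ≤ e ∧ (PySem.List.pyGet? arr e).getD 0 = 0 then pvAEnd arr s (e - 1) else e
termination_by (e + 1 - s).toNat
decreasing_by omega

def getStripIndices_py (arr : List Int) : Int × Int :=
  let start_index := pvAStart arr 0
  ((start_index : Int), pvAEnd arr (start_index : Int) ((arr.length : Int) - 1))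

-- ===== PORT B =====
def getStripIndices_py_alt (arr : List Int) : Int × Int :=
  let nz := (List.range arr.length).filter (fun i => arr.getD i 0 != 0)
  match nz with
  | [] => ((arr.length : Int), (arr.length : Int) - 1)
  | i :: _ => ((i : Int), ((nz.getLastD 0 : Nat) : Int))

-- ===== PRECONDITION & SPEC =====
def Spec_getStripIndices_py (arr : List Int) (out : Int × Int) : Prop := out = getStripIndices_py_alt arr
instance (arr : List Int) (out : Int × Int) : Decidable (Spec_getStripIndices_py arr out) := by unfold Spec_getStripIndices_py; infer_instance

-- ===== CLAIM (what is proved, stated in full; the proofs are below) =====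
def Claim_equal_getStripIndices_py : Prop := ∀ (arr : List Int), Dom_getStripIndices_py arr → Spec_getStripIndices_py arr (getStripIndices_py arr)

-- ===== LEMMAS AND PROOFS =====

lemma pv_start_eq (arr : List Int) :
    ∀ (k i : Nat), i + k = arr.length →
      pvAStart arr i =
        (((List.range' i k).filter (fun j => arr.getD j 0 != 0)).headD arr.length) := by
  intro k
  induction k with
  | zero =>
    intro i hi
    have hni : ¬ i < arr.length := by omega
    rw [pvAStart, dif_neg hni]
    simp only [List.range'_zero, List.filter_nil, List.headD_nil]
    omega
  | succ k ih =>
    intro i hi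
    have hlt : i < arr.length := by omega
    rw [pvAStart, dif_pos hlt, List.range'_succ, List.filter_cons]
    by_cases hz : arr[i] = 0
    · have hd : arr.getD i 0 = 0 := by rw [List.getD_eq_getElem arr 0 hlt]; exact hz
      rw [if_pos hz, if_neg (by simpa [List.getD] using hd)]
      exact ih (i + 1) (by omega)
    · have hd : arr.getD i 0 ≠ 0 := by rw [List.getD_eq_getElem arr 0 hlt]; exact hz
      rw [if_neg hz, if_pos (by simpa [List.getD] using hd), List.headD_cons]

lemma pv_getLastD_mem : ∀ (l : List Nat) (d : Nat), l.getLastD d ∈ d :: l := by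
  intro l
  induction l with
  | nil => intro d; simp
  | cons a t ih =>
    intro d
    rw [List.getLastD_cons]
    have := ih a
    simp at this ⊢
    tauto

lemma pv_le_getLastD : ∀ (l : List Nat) (d : Nat), l.Pairwise (· < ·) → ∀ x ∈ l, x ≤ l.getLastD d := by
  intro l
  induction l with
  | nil => simp
  | cons a t ih =>
    intro d hp x hx
    rw [List.getLastD_cons]
    rcases List.mem_cons.mp hx with rfl | hxt
    · cases t with
      | nil => simp
      | cons b t' =>
        have hab : x < b := (List.pairwise_cons.mp hp).1 b (by simp)
        have := ih x (List.pairwise_cons.mp hp).2 b (by simp)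
        omega
    · exact ih a (List.pairwise_cons.mp hp).2 x hxt

lemma pv_end_run (arr : List Int) (s : Int) (L : Nat)
    (hs : s ≤ (L : Int)) (hLn : L < arr.length)
    (hLnz : arr.getD L 0 ≠ 0)
    (hzero : ∀ j : Nat, L < j → j < arr.length → arr.getD j 0 = 0) :
    ∀ (k : Nat), (L : Int) + k ≤ (arr.length : Int) - 1 → pvAEnd arr s ((L : Int) + k) = L := by
  intro k
  induction k with
  | zero =>
    intro _
    simp only [Nat.cast_zero, add_zero]
    rw [pvAEnd]
    have hLn' : ((L : Int)).toNat < arr.length := by omega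
    have hget : PySem.List.pyGet? arr (L : Int) = some (arr[((L : Int)).toNat]'hLn') := by
      rw [PySem.List.pyGet?_eq_some_getElem] <;> omega
    have hne : arr[((L : Int)).toNat]'hLn' ≠ 0 := by
      have : ((L : Int)).toNat = L := by omega
      simp only [this]
      rwa [List.getD_eq_getElem arr 0 hLn] at hLnz
    push_cast at hget
    rw [hget]
    simp
    intro _ h0
    have hne2 : arr[L] ≠ 0 := by simpa using hne
    exact absurd h0 hne2
  | succ k ih =>
    intro hk
    have he : (0:Int) ≤ (L : Int) + (k + 1) := by positivity
    have hlt : ((L : Int) + (k + 1)).toNat < arr.length := by omega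
    have hLlt : L < ((L : Int) + (k + 1)).toNat := by omega
    have hget : PySem.List.pyGet? arr ((L : Int) + (k + 1)) =
        some (arr[((L : Int) + (k + 1)).toNat]'hlt) := by
      rw [PySem.List.pyGet?_eq_some_getElem] <;> omega
    have hz : arr[((L : Int) + (k + 1)).toNat] = 0 := by
      have := hzero _ hLlt hlt
      rwa [List.getD_eq_getElem arr 0 hlt] at this
    rw [pvAEnd]
    have hcond : s ≤ (L : Int) + ((k : Int) + 1) := by omega
    push_cast
    push_cast at hget hz
    simp only [hget, hz, Option.getD_some, hcond, and_self, dite_true]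
    have : (L : Int) + ((k : Int) + 1) - 1 = (L : Int) + (k : Int) := by ring
    rw [this]
    exact ih (by omega)

-- ===== VERDICT (by name: the statement is the Claim_ definition above) =====
theorem getStripIndices_py_spec : Claim_equal_getStripIndices_py := by
  intro arr _
  unfold Spec_getStripIndices_py getStripIndices_py getStripIndices_py_alt
  have hrange : List.range arr.length = List.range' 0 arr.length := List.range_eq_range'
  have hstart : pvAStart arr 0 =
      ((List.range arr.length).filter (fun j => arr.getD j 0 != 0)).headD arr.length := by
    rw [hrange]; exact pv_start_eq arr arr.length 0 (by omega)
  have hmem : ∀ j : Nat, j ∈ (List.range arr.length).filter (fun j => arr.getD j 0 != 0) ↔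
      (j < arr.length ∧ arr.getD j 0 ≠ 0) := by
    intro j; simp [List.mem_filter, List.mem_range]
  have hpw : ((List.range arr.length).filter (fun j => arr.getD j 0 != 0)).Pairwise (· < ·) :=
    (List.pairwise_lt_range).filter _
  cases hnz : (List.range arr.length).filter (fun j => arr.getD j 0 != 0) with
  | nil =>
    rw [hnz] at hstart
    simp only [List.headD_nil] at hstart
    simp only [hstart]
    rw [pvAEnd]
    have : ¬ ((arr.length : Int) ≤ (arr.length : Int) - 1) := by omega
    simp [this]
  | cons h t =>
    rw [hnz] at hstart hmem hpw
    simp only [List.headD_cons] at hstart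
    obtain ⟨L, hL⟩ : ∃ L, (h :: t).getLastD 0 = L := ⟨_, rfl⟩
    have hLmem : L ∈ h :: t := by
      rw [← hL, List.getLastD_cons]
      have := pv_getLastD_mem t h
      simp at this ⊢
      tauto
    have hLfacts := (hmem L).mp hLmem
    have hhfacts := (hmem h).mp (by simp)
    have hhL : h ≤ L := by
      rcases List.mem_cons.mp hLmem with rfl | hm
      · omega
      · exact Nat.le_of_lt ((List.pairwise_cons.mp hpw).1 L hm)
    have hmax : ∀ j ∈ h :: t, j ≤ L := by
      rw [← hL]; exact pv_le_getLastD (h :: t) 0 hpw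
    have hzero : ∀ j : Nat, L < j → j < arr.length → arr.getD j 0 = 0 := by
      intro j hLj hjn
      by_contra hnzj
      have : j ∈ h :: t := (hmem j).mpr ⟨hjn, hnzj⟩
      have := hmax j this
      omega
    have hend : pvAEnd arr (h : Int) ((arr.length : Int) - 1) = L := by
      have hk : (L : Int) + ((arr.length - 1 - L : Nat) : Int) = (arr.length : Int) - 1 := by
        have := hLfacts.1; omega
      have := pv_end_run arr (h : Int) L (by exact_mod_cast hhL) hLfacts.1 hLfacts.2 hzero
        (arr.length - 1 - L) (by omega)
      rw [hk] at this
      exact this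
    simp only [hstart, hend, hL]
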